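-- pv_equiv track=rewrite | github.com/vini-muchulski/Studies | Py/exercicios/hacker_rank_ibm/questao_1.py | play_segments
-- ===== SOURCE A (Python) =====
-- def play_segments(coins):
--     n = len(coins)
--
--     for i in range(n+1):
--         player_1 = sum(coins[:i]) - (i - sum(coins[:i]))
--         player_2 = sum(coins[i:]) - (n - i - sum(coins[i:]))
--
--         if player_1 > player_2:
--             return i
--
--     return n
-- ===== SOURCE B (Python) =====
-- def play_segments(coins):
--     n = len(coins)
--     total = sum(coins)
--     pref = 0
--     i = 0
--     for c in coins:
--         if 4 * pref - 2 * i > 2 * total - n: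
--             return i
--         pref += c
--         i += 1
--     return n
-- ===== Notes on version B (the rewrite author's own statement) =====
-- stated objective: alternative
-- what changed: Replaced the per-index re-summation of both list halves (two slices summed at every split point) with a single pass that keeps a running prefix sum and tests the algebraically simplified inequality 4*prefix - 2*i > 2*total - n; the final i = n check is dropped because it returns n either way.
import Mathlib
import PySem

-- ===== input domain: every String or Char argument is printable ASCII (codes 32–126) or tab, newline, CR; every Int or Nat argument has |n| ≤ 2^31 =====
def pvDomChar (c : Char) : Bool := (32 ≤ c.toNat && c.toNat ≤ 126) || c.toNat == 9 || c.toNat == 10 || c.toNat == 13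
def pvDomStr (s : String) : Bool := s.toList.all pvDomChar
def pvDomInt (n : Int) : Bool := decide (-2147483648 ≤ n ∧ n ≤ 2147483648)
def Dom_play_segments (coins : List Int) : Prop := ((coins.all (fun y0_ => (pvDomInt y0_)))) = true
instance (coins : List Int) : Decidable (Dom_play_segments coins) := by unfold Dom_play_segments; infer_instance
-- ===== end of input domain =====

-- B re-implements A in one pass with a running prefix sum instead of re-summing both slices at every split point; return values are identical.

-- ===== PORT A =====
-- loop 'for i in range(n+1): … return i' / fallthrough 'return n'
def pvGoA (coins : List Int) (n : Int) : List Int → Int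
  | [] => n
  | i :: rest =>
    let player_1 := (PySem.List.slice coins none (some i)).sum -
                    (i - (PySem.List.slice coins none (some i)).sum)
    let player_2 := (PySem.List.slice coins (some i) none).sum -
                    (n - i - (PySem.List.slice coins (some i) none).sum)
    if player_1 > player_2 then i else pvGoA coins n rest

def play_segments (coins : List Int) : Int :=
  let n : Int := coins.length
  pvGoA coins n (PySem.List.pyRange 0 (n + 1) 1)

-- ===== PORT B =====
-- loop 'for c in coins: …' carrying (pref, i); fallthrough 'return n'
def pvGoB (n total : Int) : List Int → Int → Int → Int
  | [], _, _ => n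
  | c :: rest, pref, i =>
    if 4 * pref - 2 * i > 2 * total - n then i
    else pvGoB n total rest (pref + c) (i + 1)

def play_segments_alt (coins : List Int) : Int :=
  let n : Int := coins.length
  let total := coins.sum
  pvGoB n total coins 0 0

-- ===== PRECONDITION & SPEC =====
def Spec_play_segments (coins : List Int) (out : Int) : Prop := out = play_segments_alt coins
instance (coins : List Int) (out : Int) : Decidable (Spec_play_segments coins out) := by unfold Spec_play_segments; infer_instance

-- ===== CLAIM (what is proved, stated in full; the proofs are below) =====
def Claim_equal_play_segments : Prop := ∀ (coins : List Int), Dom_play_segments coins → Spec_play_segments coins (play_segments coins)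

-- ===== LEMMAS AND PROOFS =====

-- Invariant: with t the processed pref and l the remaining suffix, B's loop state
-- (t.sum, t.length) makes pvGoB agree with pvGoA on the remaining range of indices.
theorem pvGo_agree (coins : List Int) (t l : List Int) (h : coins = t ++ l) :
    pvGoB coins.length coins.sum l t.sum t.length
      = pvGoA coins coins.length (PySem.List.pyRange t.length (coins.length + 1) 1) := by
  induction l generalizing t with
  | nil =>
    -- i = n: A checks index n, where both branches return n; B returns n directly.
    have hlen : (t.length : Int) = (coins.length : Int) := by simp [h]
    rw [PySem.List.pyRange_one_cons (by omega)]
    rw [PySem.List.pyRange_one_eq_nil (by omega)]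
    simp [pvGoA, pvGoB, hlen]
  | cons c rest ih =>
    have hlen : coins.length = t.length + (rest.length + 1) := by simp [h]
    have hi : (t.length : Int) < (coins.length : Int) + 1 := by omega
    rw [PySem.List.pyRange_one_cons hi]
    -- the slices at index t.length are exactly t and c :: rest
    have hsl1 : PySem.List.slice coins none (some (t.length : Int)) = t := by
      rw [PySem.List.slice_to_natCast]; simp [h]
    have hsl2 : PySem.List.slice coins (some (t.length : Int)) none = c :: rest := by
      rw [PySem.List.slice_from_natCast]; simp [h]
    have hsum : coins.sum = t.sum + (c + rest.sum) := by simp [h]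
    by_cases hc : 4 * t.sum - 2 * (t.length : Int) > 2 * coins.sum - (coins.length : Int)
    · -- both loops stop here and return t.length
      simp only [pvGoB, pvGoA, hsl1, hsl2, List.sum_cons, if_pos hc]
      split_ifs with h2
      · rfl
      · exfalso; omega
    · -- neither condition fires: both loops continue; apply the invariant to t ++ [c]
      simp only [pvGoB, pvGoA, hsl1, hsl2, List.sum_cons, if_neg hc]
      split_ifs with h2
      · exfalso; omega
      · have := ih (t ++ [c]) (by simp [h])
        simpa using this

-- ===== VERDICT (by name: the statement is the Claim_ definition above) =====
theorem play_segments_spec : Claim_equal_play_segments := by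
  intro coins _
  unfold Spec_play_segments play_segments play_segments_alt
  have := pvGo_agree coins [] coins (by simp)
  simpa using this.symm
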